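-- pv_equiv track=rewrite | github.com/touseef0707/playfair-cipher-2.0 | playfair_encrypt.py | shuffle_text
-- ===== SOURCE A (Python) =====
-- def generate_shuffle_indices(shuffle_key, length):
--     """
--     Generate shuffling indices based on the shuffle key
--
--     Args:
--         shuffle_key: The key to use for shuffling
--         length: The length of the text to shuffle
--
--     Returns:
--         A list of indices for shuffling
--     """
--     # Convert the shuffle key to a list of integers
--     if len(shuffle_key) == 0:
--         return list(range(length))
--
--     # Convert shuffle key chars to values
--     key_values = []
--     for c in shuffle_key:
--         # Convert to a value between 0-15
--         if c.isdigit():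
--             key_values.append(int(c))
--         elif 'A' <= c <= 'F' or 'a' <= c <= 'f':
--             key_values.append(10 + ord(c.upper()) - ord('A'))
--         else:
--             key_values.append(ord(c) % 16)
--
--     # Generate indices
--     indices = list(range(length))
--
--     # Shuffle the indices using Fisher-Yates algorithm with the key values
--     for i in range(length - 1, 0, -1):
--         # Use key_values to determine the swap index
--         j = key_values[i % len(key_values)] % (i + 1)
--         # Swap indices[i] and indices[j]
--         indices[i], indices[j] = indices[j], indices[i]
--
--     return indices
--
-- def shuffle_text(text, shuffle_key):
--     """
--     Shuffle the text using the provided shuffle key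
--
--     Args:
--         text: The text to shuffle
--         shuffle_key: The key to use for shuffling
--
--     Returns:
--         Shuffled text
--     """
--     if not text:
--         return ""
--
--     # Generate shuffling indices
--     indices = generate_shuffle_indices(shuffle_key, len(text))
--
--     # Create a mapping from original positions to new positions
--     position_map = {}
--     for new_pos, old_pos in enumerate(indices):
--         position_map[old_pos] = new_pos
--
--     # Apply the shuffling
--     shuffled = [''] * len(text)
--     for old_pos, char in enumerate(text):
--         new_pos = position_map[old_pos]
--         shuffled[new_pos] = char
--
--     return ''.join(shuffled)
-- ===== SOURCE B (Python) =====
-- def _key_value(c):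
--     """Key-char value, by direct ASCII arithmetic (same values as A's branch logic)."""
--     if '0' <= c <= '9':
--         return ord(c) - 48
--     if 'A' <= c <= 'F':
--         return ord(c) - 55
--     if 'a' <= c <= 'f':
--         return ord(c) - 87
--     return ord(c) % 16
--
-- def shuffle_text(text, shuffle_key):
--     """Apply the key-driven Fisher-Yates swap sequence directly to the characters.
--
--     A builds an index permutation indices = FY(identity), inverts it into a
--     position_map dict and scatters, which makes shuffled[k] = text[indices[k]];
--     applying the very same swap sequence to the characters themselves produces
--     that string directly — no index list, no inverse map, no scatter pass."""
--     if not text: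
--         return ""
--     chars = list(text)
--     if shuffle_key:
--         kv = [_key_value(c) for c in shuffle_key]
--         m = len(kv)
--         for i in range(len(chars) - 1, 0, -1):
--             j = kv[i % m] % (i + 1)
--             chars[i], chars[j] = chars[j], chars[i]
--     return ''.join(chars)
-- ===== Notes on version B (the rewrite author's own statement) =====
-- stated objective: simpler
-- what changed: B drops A's index-permutation list, inverse position_map dict and scatter pass entirely: it applies the same key-driven Fisher-Yates swap sequence directly to the character list and joins it, which is correct because A's scatter through the inverse map yields shuffled[k] = text[indices[k]], exactly what the in-place swaps produce.
import Mathlib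
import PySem

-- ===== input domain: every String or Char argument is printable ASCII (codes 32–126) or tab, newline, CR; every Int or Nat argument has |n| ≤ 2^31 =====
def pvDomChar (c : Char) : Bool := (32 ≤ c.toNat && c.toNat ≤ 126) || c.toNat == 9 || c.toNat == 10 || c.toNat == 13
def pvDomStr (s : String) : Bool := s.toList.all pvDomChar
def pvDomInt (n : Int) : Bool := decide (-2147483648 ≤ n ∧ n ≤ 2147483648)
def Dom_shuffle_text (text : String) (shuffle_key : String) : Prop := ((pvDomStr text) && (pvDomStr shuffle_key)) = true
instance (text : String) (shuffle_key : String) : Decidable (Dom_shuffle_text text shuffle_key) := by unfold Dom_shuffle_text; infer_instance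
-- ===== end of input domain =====

-- B applies the key-driven Fisher-Yates swap sequence directly to the character list
-- instead of A's index permutation + inverse-map dict + scatter (objective: simpler).


-- ===== PORT A =====
-- key-value of one key character (0-15-ish value; `int(c)` is exact here since the
-- isdigit branch guarantees a single ASCII digit, so ofChars? is some)
def pvKeyVal (c : Char) : Int :=
  if PySem.Chars.isdigit c then (PySem.Int.ofChars? [c]).getD 0
  else if ('A' ≤ c ∧ c ≤ 'F') ∨ ('a' ≤ c ∧ c ≤ 'f') then
    10 + ((PySem.Chars.upperChar c).toNat : Int) - ('A'.toNat : Int)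
  else PySem.Int.mod (c.toNat : Int) 16

-- one Fisher-Yates iteration: j = key_values[i % len(key_values)] % (i + 1);
-- indices[i], indices[j] = indices[j], indices[i]  (all indices provably in range,
-- so pyGetD/pySetD defaults are unreachable)
def pvFyStep (kv : List Int) (ind : List Int) (i : Int) : List Int :=
  let j := PySem.Int.mod (PySem.List.pyGetD kv (PySem.Int.mod i (kv.length : Int)) 0) (i + 1)
  let vi := PySem.List.pyGetD ind i 0
  let vj := PySem.List.pyGetD ind j 0
  PySem.List.pySetD (PySem.List.pySetD ind i vj) j vi

def generate_shuffle_indices (shuffle_key : String) (length : Nat) : List Int :=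
  if shuffle_key.toList.length = 0 then PySem.List.pyRange 0 (length : Int) 1
  else
    let kv := shuffle_key.toList.map pvKeyVal
    (PySem.List.pyRange ((length : Int) - 1) 0 (-1)).foldl (pvFyStep kv)
      (PySem.List.pyRange 0 (length : Int) 1)

def shuffle_text (text : String) (shuffle_key : String) : String :=
  if text.toList = [] then ""
  else
    let t := text.toList
    let indices := generate_shuffle_indices shuffle_key t.length
    let pmap := (PySem.List.enumerate indices 0).foldl
      (fun d p => d.insert p.2 p.1) (PySem.Dict.empty : PySem.Dict Int Int)
    -- position_map[old_pos] always hits (indices is a permutation of range(len(text))):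
    -- getD's default and pySetD's clamping are unreachable
    let shuffled := (PySem.List.enumerate t 0).foldl
      (fun sh p => PySem.List.pySetD sh (pmap.getD p.1 0) [p.2])
      (List.replicate t.length ([] : List Char))
    String.ofList (PySem.Chars.join [] shuffled)

-- ===== PORT B =====
-- _key_value by direct ASCII arithmetic; all values are nonnegative Python ints,
-- so Nat is exact (each subtraction is guarded by the branch's lower bound)
def pvKeyB (c : Char) : Nat :=
  if '0' ≤ c ∧ c ≤ '9' then c.toNat - 48
  else if 'A' ≤ c ∧ c ≤ 'F' then c.toNat - 55
  else if 'a' ≤ c ∧ c ≤ 'f' then c.toNat - 87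
  else c.toNat % 16

-- the `for i in range(len(chars)-1, 0, -1)` loop as a countdown recursion on i;
-- both swap indices are provably in range and nonnegative, so List.getD/List.set
-- are exact for Python's chars[i], chars[j] = chars[j], chars[i]
def pvSwapLoop (kv : List Nat) (i : Nat) (cs : List Char) : List Char :=
  match i with
  | 0 => cs
  | i' + 1 =>
    let j := kv.getD ((i' + 1) % kv.length) 0 % (i' + 2)
    pvSwapLoop kv i' ((cs.set (i' + 1) (cs.getD j ' ')).set j (cs.getD (i' + 1) ' '))

def shuffle_text_alt (text : String) (shuffle_key : String) : String :=
  if text.toList = [] then ""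
  else
    let cs := text.toList
    if shuffle_key.toList = [] then String.ofList cs
    else String.ofList (pvSwapLoop (shuffle_key.toList.map pvKeyB) (cs.length - 1) cs)

-- ===== PRECONDITION & SPEC =====
def Spec_shuffle_text (text : String) (shuffle_key : String) (out : String) : Prop := out = shuffle_text_alt text shuffle_key
instance (text : String) (shuffle_key : String) (out : String) : Decidable (Spec_shuffle_text text shuffle_key out) := by unfold Spec_shuffle_text; infer_instance

-- ===== CLAIM (what is proved, stated in full; the proofs are below) =====
def Claim_equal_shuffle_text : Prop := ∀ (text : String) (shuffle_key : String), Dom_shuffle_text text shuffle_key → Spec_shuffle_text text shuffle_key (shuffle_text text shuffle_key)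

-- ===== LEMMAS AND PROOFS =====

-- the two key-value functions agree on every ASCII character (kernel check, 128 cases)
theorem pv_key_all : (List.range 128).all
    (fun n => pvKeyVal (Char.ofNat n) == (pvKeyB (Char.ofNat n) : Int)) = true := by decide

theorem pv_key_eq (c : Char) (h : c.toNat < 128) : pvKeyVal c = (pvKeyB c : Int) := by
  have h2 := List.all_eq_true.mp pv_key_all c.toNat (List.mem_range.mpr h)
  rw [Char.ofNat_toNat c] at h2
  exact eq_of_beq h2

-- one Fisher-Yates swap permutes the list
theorem pvFyStep_perm (kv ind : List Int) (i : Int) (h0 : 0 ≤ i)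
    (h1 : i < (ind.length : Int)) : (pvFyStep kv ind i).Perm ind := by
  unfold pvFyStep
  dsimp only
  set j := PySem.Int.mod (PySem.List.pyGetD kv (PySem.Int.mod i (kv.length : Int)) 0) (i + 1) with hjdef
  have hj0 : 0 ≤ j := PySem.Int.mod_nonneg _ (by omega)
  have hj1 : j < i + 1 := PySem.Int.mod_lt _ (by omega)
  have hiN : i.toNat < ind.length := by omega
  have hjN : j.toNat < ind.length := by omega
  rw [PySem.List.pyGetD_eq_getElem ind (0:Int) h0 h1,
      PySem.List.pyGetD_eq_getElem ind (0:Int) hj0 (by omega),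
      PySem.List.pySetD_of_nonneg _ _ h0, PySem.List.pySetD_of_nonneg _ _ hj0]
  exact List.set_set_perm hiN hjN

-- the whole Fisher-Yates loop keeps the accumulator a permutation of range(n)
theorem pv_fy_fold_perm (kv : List Int) (l acc : List Int) (n : Nat)
    (hacc : acc.Perm (PySem.List.pyRange 0 (n : Int) 1))
    (hl : ∀ i ∈ l, 0 ≤ i ∧ i < (n : Int)) :
    (l.foldl (pvFyStep kv) acc).Perm (PySem.List.pyRange 0 (n : Int) 1) := by
  induction l generalizing acc with
  | nil => exact hacc
  | cons x xs ih =>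
    rw [List.foldl_cons]
    refine ih _ ?_ (fun i hi => hl i (List.mem_cons_of_mem _ hi))
    have hx := hl x List.mem_cons_self
    have hlen : acc.length = n := by
      have := hacc.length_eq
      rw [PySem.List.length_pyRange_one] at this
      omega
    exact (pvFyStep_perm kv acc x hx.1 (by rw [hlen]; exact hx.2)).trans hacc

theorem pv_indices_perm (shuffle_key : String) (n : Nat) :
    (generate_shuffle_indices shuffle_key n).Perm (PySem.List.pyRange 0 (n : Int) 1) := by
  unfold generate_shuffle_indices
  split
  · exact List.Perm.refl _
  · refine pv_fy_fold_perm _ _ _ n (List.Perm.refl _) (fun i hi => ?_)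
    rw [PySem.List.mem_pyRange_neg_one] at hi
    omega

-- a fold of inserts whose keys all differ from x does not change lookup at x
theorem pv_get?_foldl_insert_not_mem (ps : List (Int × Int)) (d : PySem.Dict Int Int)
    (x : Int) (h : ∀ p ∈ ps, p.2 ≠ x) :
    (ps.foldl (fun d p => d.insert p.2 p.1) d).get? x = d.get? x := by
  induction ps generalizing d with
  | nil => rfl
  | cons q qs ih =>
    rw [List.foldl_cons, ih _ (fun p hp => h p (List.mem_cons_of_mem _ hp))]
    exact PySem.Dict.get?_insert_of_ne _ _ (Ne.symm (h q List.mem_cons_self))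

-- A's position_map maps l[k] back to its position k (keys nodup)
theorem pv_dict_enum (l : List Int) : ∀ (s : Int) (d : PySem.Dict Int Int), l.Nodup →
    ∀ (k : Nat) (hk : k < l.length),
    ((PySem.List.enumerate l s).foldl (fun d p => d.insert p.2 p.1) d).get? l[k]
      = some (s + k) := by
  induction l with
  | nil => intro _ _ _ k hk; simp at hk
  | cons x xs ih =>
    intro s d hnd k hk
    rw [PySem.List.enumerate_cons, List.foldl_cons]
    cases k with
    | zero =>
      have hx : x ∉ xs := (List.nodup_cons.mp hnd).1
      rw [show ((x :: xs)[0] = x) from rfl,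
          pv_get?_foldl_insert_not_mem _ _ x ?_, PySem.Dict.get?_insert_self]
      · norm_num
      · intro p hp
        rw [PySem.List.mem_enumerate_iff] at hp
        obtain ⟨k', hk', rfl⟩ := hp
        exact fun hc => hx (hc ▸ List.getElem_mem hk')
    | succ k' =>
      have := ih (s + 1) (d.insert x s) (List.nodup_cons.mp hnd).2 k' (by simpa using hk)
      rw [show ((x :: xs)[k' + 1] = xs[k']'(by simpa using hk)) from rfl, this]
      congr 1
      push_cast
      ring

-- scatter folds: a position no pair targets keeps its initial value …
theorem pv_scatter_untouched {α : Type} (ps : List (Nat × α)) (init : List α) (m : Nat)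
    (h : ∀ p ∈ ps, p.1 ≠ m) :
    (ps.foldl (fun acc p => acc.set p.1 p.2) init)[m]? = init[m]? := by
  induction ps generalizing init with
  | nil => rfl
  | cons q qs ih =>
    rw [List.foldl_cons, ih _ (fun p hp => h p (List.mem_cons_of_mem _ hp))]
    exact List.getElem?_set_ne (h q List.mem_cons_self)

-- … and with nodup targets, a targeted in-range position ends with its pair's value
theorem pv_scatter_hit {α : Type} (ps : List (Nat × α)) (init : List α) (p : Nat × α)
    (hp : p ∈ ps) (hnd : (ps.map Prod.fst).Nodup) (hlt : p.1 < init.length) :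
    (ps.foldl (fun acc p => acc.set p.1 p.2) init)[p.1]? = some p.2 := by
  induction ps generalizing init with
  | nil => simp at hp
  | cons q qs ih =>
    rw [List.foldl_cons]
    rw [List.map_cons, List.nodup_cons] at hnd
    rcases List.mem_cons.mp hp with rfl | hp'
    · rw [pv_scatter_untouched qs _ _ ?_]
      · exact List.getElem?_set_self hlt
      · intro r hr hc
        exact hnd.1 (hc ▸ List.mem_map_of_mem hr)
    · exact ih _ hp' hnd.2 (by simpa using hlt)

-- A's inverse-map scatter equals the direct gather text[indices[k]], for any perm idx
theorem pv_scatter_eq_gather (t : List Char) (idx : List Int)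
    (hperm : idx.Perm (PySem.List.pyRange 0 (t.length : Int) 1)) :
    (PySem.List.enumerate t 0).foldl
      (fun sh p => PySem.List.pySetD sh
        (((PySem.List.enumerate idx 0).foldl (fun d p => d.insert p.2 p.1)
          (PySem.Dict.empty : PySem.Dict Int Int)).getD p.1 0) [p.2])
      (List.replicate t.length ([] : List Char))
    = idx.map (fun i => [PySem.List.pyGetD t i ' ']) := by
  set n := t.length with hn
  set pm := (PySem.List.enumerate idx 0).foldl (fun d p => d.insert p.2 p.1)
    (PySem.Dict.empty : PySem.Dict Int Int) with hpm
  have hlen : idx.length = n := by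
    have := hperm.length_eq
    rw [PySem.List.length_pyRange_one] at this
    omega
  have hnd : idx.Nodup := hperm.nodup_iff.mpr (PySem.List.nodup_pyRange_one _ _)
  have hbound : ∀ x ∈ idx, 0 ≤ x ∧ x < (n : Int) := by
    intro x hx
    exact PySem.List.mem_pyRange_one.mp (hperm.mem_iff.mp hx)
  have hinv : ∀ o : Nat, o < n → ∃ (k : Nat) (hk : k < idx.length),
      idx[k] = (o : Int) ∧ pm.get? (o : Int) = some (k : Int) := by
    intro o ho
    have hmem : (o : Int) ∈ idx := hperm.mem_iff.mpr
      (PySem.List.mem_pyRange_one.mpr ⟨Int.natCast_nonneg o, by exact_mod_cast ho⟩)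
    obtain ⟨k, hk, hke⟩ := List.mem_iff_getElem.mp hmem
    refine ⟨k, hk, hke, ?_⟩
    have := pv_dict_enum idx 0 PySem.Dict.empty hnd k hk
    rw [hke] at this
    simpa using this
  have hinj : ∀ o1 o2 : Nat, o1 < n → o2 < n →
      (pm.getD (o1 : Int) 0).toNat = (pm.getD (o2 : Int) 0).toNat → o1 = o2 := by
    intro o1 o2 h1 h2 he
    obtain ⟨k1, hk1, hke1, hg1⟩ := hinv o1 h1
    obtain ⟨k2, hk2, hke2, hg2⟩ := hinv o2 h2
    rw [PySem.Dict.getD_eq_get?_getD, hg1] at he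
    rw [PySem.Dict.getD_eq_get?_getD, hg2] at he
    simp only [Option.getD_some, Int.toNat_natCast] at he
    subst he
    have h12 : (o1 : Int) = (o2 : Int) := by rw [← hke1, ← hke2]
    exact_mod_cast h12
  have hstep1 : (PySem.List.enumerate t 0).foldl
      (fun sh p => PySem.List.pySetD sh (pm.getD p.1 0) [p.2])
      (List.replicate n ([] : List Char))
      = ((PySem.List.enumerate t 0).map
          (fun p => ((pm.getD p.1 0).toNat, ([p.2] : List Char)))).foldl
        (fun acc p => acc.set p.1 p.2) (List.replicate n []) := by
    rw [List.foldl_map]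
    apply PySem.List.foldl_congr_mem
    intro acc p hp
    rw [PySem.List.mem_enumerate_iff] at hp
    obtain ⟨o, ho, rfl⟩ := hp
    obtain ⟨k, hk, hke, hget⟩ := hinv o ho
    apply PySem.List.pySetD_of_nonneg
    rw [zero_add, PySem.Dict.getD_eq_get?_getD, hget]
    simp
  rw [hstep1]
  have hfst : ∀ q ∈ (PySem.List.enumerate t 0).map
      (fun p => ((pm.getD p.1 0).toNat, ([p.2] : List Char))), q.1 < n := by
    intro q hq
    obtain ⟨p, hp, rfl⟩ := List.mem_map.mp hq
    rw [PySem.List.mem_enumerate_iff] at hp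
    obtain ⟨o, ho, rfl⟩ := hp
    obtain ⟨k, hk, hke, hget⟩ := hinv o ho
    simp only [zero_add, PySem.Dict.getD_eq_get?_getD, hget, Option.getD_some,
      Int.toNat_natCast]
    omega
  have hndf : (((PySem.List.enumerate t 0).map
      (fun p => ((pm.getD p.1 0).toNat, ([p.2] : List Char)))).map Prod.fst).Nodup := by
    rw [List.map_map]
    apply List.Nodup.map_on
    · intro a ha b hb hab
      rw [PySem.List.mem_enumerate_iff] at ha hb
      obtain ⟨o1, ho1, rfl⟩ := ha
      obtain ⟨o2, ho2, rfl⟩ := hb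
      simp only [Function.comp_apply, zero_add] at hab
      have := hinj o1 o2 ho1 ho2 hab
      subst this
      rfl
    · exact (PySem.List.pairwise_lt_enumerate t 0).imp (by intro a b h he; subst he; omega)
  apply List.ext_getElem?
  intro m
  by_cases hm : m < n
  · have hmi : m < idx.length := by omega
    have hb := hbound idx[m] (List.getElem_mem hmi)
    have ho : (idx[m]'hmi).toNat < n := by omega
    have hoeq : (((idx[m]'hmi).toNat : Nat) : Int) = idx[m]'hmi := Int.toNat_of_nonneg hb.1
    obtain ⟨k, hk, hke, hget⟩ := hinv (idx[m]'hmi).toNat ho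
    have hkm : k = m := by
      apply (List.Nodup.getElem_inj_iff hnd).mp
      rw [hke, hoeq]
    rw [hkm] at hget
    have hqmem : ((0 : Int) + ((idx[m]'hmi).toNat : Int), t[(idx[m]'hmi).toNat]'ho)
        ∈ PySem.List.enumerate t 0 :=
      (PySem.List.mem_enumerate_iff t 0 _).mpr ⟨(idx[m]'hmi).toNat, ho, rfl⟩
    have hFs : ((pm.getD ((0 : Int) + ((idx[m]'hmi).toNat : Int)) 0).toNat,
        ([t[(idx[m]'hmi).toNat]'ho] : List Char)) = (m, [t[(idx[m]'hmi).toNat]'ho]) := by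
      rw [zero_add, PySem.Dict.getD_eq_get?_getD, hget]
      simp
    have hhit := pv_scatter_hit _ (List.replicate n ([] : List Char))
      (m, ([t[(idx[m]'hmi).toNat]'ho] : List Char))
      (hFs ▸ List.mem_map_of_mem hqmem) hndf (by simpa using hm)
    rw [hhit, List.getElem?_map, List.getElem?_eq_getElem hmi]
    simp only [Option.map_some]
    congr 2
    rw [PySem.List.pyGetD_eq_getElem t ' ' hb.1 hb.2]
  · have hu : ∀ q ∈ (PySem.List.enumerate t 0).map
        (fun p => ((pm.getD p.1 0).toNat, ([p.2] : List Char))), q.1 ≠ m := by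
      intro q hq hc
      exact hm (hc ▸ hfst q hq)
    rw [pv_scatter_untouched _ _ _ hu,
      List.getElem?_eq_none (by simpa using hm),
      List.getElem?_eq_none (by simpa [hlen] using hm)]

-- gathering through one A-side index swap = one B-side character swap
theorem pv_step_comm (t : List Char) (kvB : List Nat) (hm : kvB ≠ []) (n : Nat)
    (ind : List Int) (hlen : ind.length = n) (i : Nat) (hi : i + 1 < n) :
    (pvFyStep (kvB.map (Nat.cast)) ind ((i : Int) + 1)).map
        (fun x => PySem.List.pyGetD t x ' ')
      = (let cs := ind.map (fun x => PySem.List.pyGetD t x ' ');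
         let j := kvB.getD ((i + 1) % kvB.length) 0 % (i + 2);
         (cs.set (i + 1) (cs.getD j ' ')).set j (cs.getD (i + 1) ' ')) := by
  have hmpos : 0 < kvB.length := List.length_pos_iff.mpr hm
  set jB := kvB.getD ((i + 1) % kvB.length) 0 % (i + 2) with hjB
  have hjBlt : jB < i + 2 := Nat.mod_lt _ (by omega)
  unfold pvFyStep
  dsimp only
  -- the Int-side swap index equals (jB : Int)
  have hidx : PySem.Int.mod ((i : Int) + 1) ((kvB.map (Nat.cast : Nat → Int)).length : Int)
      = (((i + 1) % kvB.length : Nat) : Int) := by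
    rw [List.length_map, PySem.Int.mod_eq_emod_of_pos (by exact_mod_cast hmpos)]
    push_cast
    rfl
  have hget : PySem.List.pyGetD (kvB.map (Nat.cast : Nat → Int))
      (((i + 1) % kvB.length : Nat) : Int) 0
      = ((kvB.getD ((i + 1) % kvB.length) 0 : Nat) : Int) := by
    have hlt : (i + 1) % kvB.length < kvB.length := Nat.mod_lt _ (by omega)
    rw [PySem.List.pyGetD_eq_getElem _ _ (by positivity) (by simpa using (by exact_mod_cast hlt : (((i+1) % kvB.length : Nat) : Int) < (kvB.length : Int)))]
    rw [List.getD_eq_getElem _ _ hlt]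
    simp only [List.getElem_map, Int.toNat_natCast]
  have hj : PySem.Int.mod (PySem.List.pyGetD (kvB.map (Nat.cast : Nat → Int))
        (PySem.Int.mod ((i : Int) + 1) ((kvB.map (Nat.cast : Nat → Int)).length : Int)) 0)
        ((i : Int) + 1 + 1) = (jB : Int) := by
    rw [hidx, hget, PySem.Int.mod_eq_emod_of_pos (by omega), hjB]
    push_cast
    rfl
  rw [hj]
  have hi1 : (i + 1 : Nat) < ind.length := by omega
  have hjN : jB < ind.length := by omega
  have e1 : PySem.List.pyGetD ind ((i : Int) + 1) 0 = ind[i + 1] := by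
    rw [show ((i : Int) + 1) = ((i + 1 : Nat) : Int) by push_cast; ring,
      PySem.List.pyGetD_eq_getElem ind 0 (by positivity) (by exact_mod_cast hi1)]
    simp
  have e2 : PySem.List.pyGetD ind ((jB : Nat) : Int) 0 = ind[jB] := by
    rw [PySem.List.pyGetD_eq_getElem ind 0 (by positivity) (by exact_mod_cast hjN)]
    simp
  rw [e1, e2,
    PySem.List.pySetD_of_nonneg _ _ (show (0:Int) ≤ (i : Int) + 1 by positivity),
    PySem.List.pySetD_of_nonneg _ _ (show (0:Int) ≤ ((jB : Nat) : Int) by positivity)]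
  have hti : ((i : Int) + 1).toNat = i + 1 := by omega
  have htj : ((jB : Nat) : Int).toNat = jB := by omega
  rw [hti, htj, List.map_set, List.map_set]
  congr 2
  · rw [List.getD_eq_getElem _ _ (by simpa using hjN), List.getElem_map]
  · rw [List.getD_eq_getElem _ _ (by simpa using hi1), List.getElem_map]

-- the whole loop: gathering through A's index Fisher-Yates = B's character swaps
theorem pv_loop_comm (t : List Char) (kvB : List Nat) (hm : kvB ≠ []) (n : Nat) :
    ∀ (k : Nat), k < n → ∀ (ind : List Int),
    ind.Perm (PySem.List.pyRange 0 (n : Int) 1) →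
    ((PySem.List.pyRange (k : Int) 0 (-1)).foldl (pvFyStep (kvB.map (Nat.cast))) ind).map
        (fun x => PySem.List.pyGetD t x ' ')
      = pvSwapLoop kvB k (ind.map (fun x => PySem.List.pyGetD t x ' ')) := by
  intro k
  induction k with
  | zero =>
    intro _ ind _
    simp only [Nat.cast_zero]
    rw [PySem.List.pyRange_neg_one_eq_nil le_rfl]
    rfl
  | succ i ih =>
    intro hk ind hperm
    have hlen : ind.length = n := by
      have := hperm.length_eq
      rw [PySem.List.length_pyRange_one] at this
      omega
    rw [PySem.List.pyRange_neg_one_cons (by exact_mod_cast Nat.succ_pos i), List.foldl_cons]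
    have hcast : ((i + 1 : Nat) : Int) = (i : Int) + 1 := by push_cast; ring
    have hstep := pv_step_comm t kvB hm n ind hlen i hk
    have hperm' : (pvFyStep (kvB.map (Nat.cast)) ind ((i : Int) + 1)).Perm
        (PySem.List.pyRange 0 (n : Int) 1) :=
      (pvFyStep_perm _ ind _ (by positivity) (by rw [hlen]; exact_mod_cast hk)).trans hperm
    rw [hcast, show ((i : Int) + 1 - 1) = (i : Int) by ring,
      ih (by omega) _ hperm', hstep]
    rfl

-- empty-key gather: indices = range(n) gathers back to t itself
theorem pv_gather_range (t : List Char) :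
    (PySem.List.pyRange 0 (t.length : Int) 1).map (fun x => PySem.List.pyGetD t x ' ') = t :=
  PySem.List.map_pyGetD_pyRange_zero t ' '

-- ===== VERDICT (by name: the statement is the Claim_ definition above) =====
theorem shuffle_text_spec : Claim_equal_shuffle_text := by
  intro text shuffle_key hdom
  unfold Spec_shuffle_text shuffle_text shuffle_text_alt
  by_cases h : text.toList = []
  · rw [if_pos h, if_pos h]
  · rw [if_neg h, if_neg h]
    dsimp only
    rw [pv_scatter_eq_gather text.toList _ (pv_indices_perm shuffle_key text.toList.length)]
    rw [show (fun i => [PySem.List.pyGetD text.toList i ' ']) =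
      (fun c => ([c] : List Char)) ∘ (fun i => PySem.List.pyGetD text.toList i ' ') from rfl,
      ← List.map_map, PySem.Chars.join_nil_singletons]
    by_cases hk : shuffle_key.toList = []
    · rw [if_pos hk]
      unfold generate_shuffle_indices
      rw [if_pos (by rw [hk]; rfl), pv_gather_range]
    · rw [if_neg hk]
      unfold generate_shuffle_indices
      rw [if_neg (by simpa using hk)]
      dsimp only
      have hkeys : shuffle_key.toList.map pvKeyVal
          = (shuffle_key.toList.map pvKeyB).map (Nat.cast) := by
        rw [List.map_map]
        apply List.map_congr_left
        intro c hc
        have hdc : pvDomChar c = true := by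
          have hd := hdom
          unfold Dom_shuffle_text pvDomStr at hd
          simp only [Bool.and_eq_true, List.all_eq_true] at hd
          exact hd.2 c hc
        unfold pvDomChar at hdc
        simp only [Bool.or_eq_true, Bool.and_eq_true, decide_eq_true_eq, beq_iff_eq] at hdc
        exact pv_key_eq c (by omega)
      have hn1 : 0 < text.toList.length := List.length_pos_iff.mpr h
      have hcast : ((text.toList.length : Int) - 1) = ((text.toList.length - 1 : Nat) : Int) := by
        omega
      rw [hkeys, hcast, pv_loop_comm text.toList (shuffle_key.toList.map pvKeyB)
        (by simpa using hk) text.toList.length (text.toList.length - 1) (by omega) _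
        (List.Perm.refl _), pv_gather_range]
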